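-- pv_equiv track=rewrite | github.com/aorursy/KT_dataset_py | eyyuptemlioglu_learn-python-challenge-day-6-exercises.py | multi_word_search
-- ===== SOURCE A (Python) =====
-- def word_search(doc_list, keyword):
--     """
--     Takes a list of documents (each document is a string) and a keyword.
--     Returns list of the index values into the original list for all documents
--     containing the keyword.
--
--     Example:
--     doc_list = ["The Learn Python Challenge Casino.", "They bought a car", "Casinoville"]
--     >>> word_search(doc_list, 'casino')
--     >>> [0]
--     """
--     length_of_doc_list = len(doc_list)
--     length_of_keyword = len(keyword)
--
--     list_of_index = []
--
--     for m in range(length_of_doc_list):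
--         lowered_doc_list = doc_list[m].lower()
--
--         splitted_doc_list = lowered_doc_list.split()
--
--         length_of_splitted_string = len(splitted_doc_list)
--
--         for k in range(length_of_splitted_string):
--             selected_word = splitted_doc_list[k]
--             length_of_selected_word = len(selected_word)
--             if selected_word.startswith(keyword):
--                 if length_of_selected_word == length_of_keyword:
--                     list_of_index.append(m)
--                 elif length_of_selected_word == length_of_keyword + 1:
--                     if selected_word[length_of_selected_word-1] == "." or selected_word[length_of_selected_word-1] == ",":
--                         list_of_index.append(m)
--
--     return list_of_index
--
-- def multi_word_search(doc_list, keywords):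
--     """
--     Takes list of documents (each document is a string) and a list of keywords.
--     Returns a dictionary where each key is a keyword, and the value is a list of indices
--     (from doc_list) of the documents containing that keyword
--
--     >>> doc_list = ["The Learn Python Challenge Casino.", "They bought a car and a casino", "Casinoville"]
--     >>> keywords = ['casino', 'they']
--     >>> multi_word_search(doc_list, keywords)
--     {'casino': [0, 1], 'they': [1]}
--     """
--     number_of_keywords = len(keywords)
--     dictionary = {}
--     for i in range(number_of_keywords):
--         selected_keyword = keywords[i]
--         list_of_index = word_search(doc_list, selected_keyword)
--         dictionary[selected_keyword] = list_of_index
--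
--     return dictionary
-- ===== SOURCE B (Python) =====
-- def multi_word_search(doc_list, keywords):
--     # One pass over all documents builds word -> list of doc indices (with one
--     # entry per occurrence); each keyword is then answered by dictionary lookups.
--     # A word matches keyword k exactly when it is k, k+'.' or k+','.
--     index = {}
--     for m, doc in enumerate(doc_list):
--         for w in doc.lower().split():
--             index[w] = index.get(w, []) + [m]
--     result = {}
--     for k in keywords:
--         result[k] = sorted(index.get(k, []) + index.get(k + ".", []) + index.get(k + ",", []))
--     return result
-- ===== Notes on version B (the rewrite author's own statement) =====
-- stated objective: faster
-- what changed: Instead of re-scanning and re-splitting every document for each keyword (A calls word_search per keyword), B splits all documents once into a word -> doc-index list dictionary and answers each keyword by three lookups (word, word+'.', word+',') merged with sorted.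
import Mathlib
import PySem

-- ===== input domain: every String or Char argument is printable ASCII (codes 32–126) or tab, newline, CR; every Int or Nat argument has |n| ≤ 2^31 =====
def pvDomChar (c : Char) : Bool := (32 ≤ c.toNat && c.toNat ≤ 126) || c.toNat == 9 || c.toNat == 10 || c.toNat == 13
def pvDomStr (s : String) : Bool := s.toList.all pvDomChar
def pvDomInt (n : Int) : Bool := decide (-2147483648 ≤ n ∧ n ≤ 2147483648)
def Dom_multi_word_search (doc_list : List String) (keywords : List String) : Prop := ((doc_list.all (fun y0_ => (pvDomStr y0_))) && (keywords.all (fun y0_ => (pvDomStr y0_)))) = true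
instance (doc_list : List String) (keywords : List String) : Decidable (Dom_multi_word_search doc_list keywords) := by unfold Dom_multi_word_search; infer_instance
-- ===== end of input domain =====

-- B builds the word -> doc-index dictionary once instead of re-splitting every document per keyword (objective: faster).

-- ===== PORT A =====
-- literal port of word_search (helper of A)
def word_search (doc_list : List String) (keyword : String) : List Int :=
  let length_of_keyword := PySem.Str.len keyword
  (PySem.List.pyRange 0 (PySem.List.len doc_list) 1).foldl (fun list_of_index m =>
    let lowered_doc_list := PySem.Str.lower (PySem.List.pyGetD doc_list m "")
    let splitted_doc_list := PySem.Str.split₀ lowered_doc_list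
    (PySem.List.pyRange 0 (PySem.List.len splitted_doc_list) 1).foldl (fun list_of_index k =>
      let selected_word := PySem.List.pyGetD splitted_doc_list k ""
      let length_of_selected_word := PySem.Str.len selected_word
      if PySem.Str.startswith selected_word keyword = true then
        if length_of_selected_word = length_of_keyword then
          list_of_index ++ [m]
        else if length_of_selected_word = length_of_keyword + 1 then
          if PySem.Str.pyGet? selected_word (length_of_selected_word - 1) = some '.' ∨
             PySem.Str.pyGet? selected_word (length_of_selected_word - 1) = some ',' then
            list_of_index ++ [m]
          else list_of_index
        else list_of_index
      else list_of_index) list_of_index) []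

def multi_word_search (doc_list : List String) (keywords : List String) : List (String × List Int) :=
  ((PySem.List.pyRange 0 (PySem.List.len keywords) 1).foldl (fun dictionary i =>
      let selected_keyword := PySem.List.pyGetD keywords i ""
      dictionary.insert selected_keyword (word_search doc_list selected_keyword))
    (PySem.Dict.empty : PySem.Dict String (List Int))).items

-- ===== PORT B =====
-- Source B's first loop: one pass over the documents building word -> list of doc indices
def mwsIndex (doc_list : List String) : PySem.Dict String (List Int) :=
  (PySem.List.enumerate doc_list).foldl (fun index p =>
    (PySem.Str.split₀ (PySem.Str.lower p.2)).foldl (fun index w =>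
      index.insert w (index.getD w [] ++ [p.1])) index) PySem.Dict.empty

def multi_word_search_alt (doc_list : List String) (keywords : List String) : List (String × List Int) :=
  let index := mwsIndex doc_list
  (keywords.foldl (fun result k =>
      result.insert k (PySem.List.sorted
        (index.getD k [] ++ index.getD (k ++ ".") [] ++ index.getD (k ++ ",") []) (fun x => x) false))
    (PySem.Dict.empty : PySem.Dict String (List Int))).items

-- ===== PRECONDITION & SPEC =====
def Spec_multi_word_search (doc_list : List String) (keywords : List String) (out : List (String × List Int)) : Prop := out = multi_word_search_alt doc_list keywords
instance (doc_list : List String) (keywords : List String) (out : List (String × List Int)) : Decidable (Spec_multi_word_search doc_list keywords out) := by unfold Spec_multi_word_search; infer_instance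

-- ===== CLAIM (what is proved, stated in full; the proofs are below) =====
def Claim_equal_multi_word_search : Prop := ∀ (doc_list : List String) (keywords : List String), Dom_multi_word_search doc_list keywords → Spec_multi_word_search doc_list keywords (multi_word_search doc_list keywords)

-- ===== LEMMAS AND PROOFS =====

-- the words of one document, as both programs compute them
def mwsWords (doc : String) : List String := PySem.Str.split₀ (PySem.Str.lower doc)

-- the match test of A's inner branches, flattened to one boolean
def mwsHit (kw w : String) : Bool := w == kw || w == (kw ++ ".") || w == (kw ++ ",")

lemma mws_ne_dot (kw : String) : kw ≠ kw ++ "." := by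
  intro h; have := congrArg String.toList h; simp at this

lemma mws_ne_comma (kw : String) : kw ≠ kw ++ "," := by
  intro h; have := congrArg String.toList h; simp at this

lemma mws_dot_ne_comma (kw : String) : (kw ++ ".") ≠ (kw ++ ",") := by
  intro h; have := congrArg String.toList h; simp at this

-- A's branch condition holds exactly when the word is kw, kw+'.' or kw+','
lemma mws_concat_get (K : List Char) (c : Char) :
    PySem.Chars.pyGet? (K ++ [c]) (((K ++ [c]).length : Int) - 1) = some c := by
  have h1 : ((K ++ [c]).length : Int) - 1 = (K.length : Int) := by simp
  rw [h1]
  simp [PySem.Chars.pyGet?_eq_listPyGet?]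

lemma mws_cond_iff (kw w : String) :
    (PySem.Str.startswith w kw = true ∧
      (PySem.Str.len w = PySem.Str.len kw ∨
        (PySem.Str.len w = PySem.Str.len kw + 1 ∧
          (PySem.Str.pyGet? w (PySem.Str.len w - 1) = some '.' ∨
           PySem.Str.pyGet? w (PySem.Str.len w - 1) = some ','))))
    ↔ mwsHit kw w = true := by
  simp only [mwsHit, PySem.Str.startswith_eq, PySem.Str.len_eq, PySem.Str.pyGet?_eq,
    Bool.or_eq_true, beq_iff_eq, ← String.toList_inj, String.toList_append,
    show (".".toList) = ['.'] from rfl, show (",".toList) = [','] from rfl]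
  rw [PySem.Chars.startswith_iff]
  constructor
  · rintro ⟨hpre, h | ⟨h, hc⟩⟩
    · exact Or.inl (Or.inl (hpre.eq_of_length (by exact_mod_cast h.symm)).symm)
    · obtain ⟨t, ht⟩ := hpre
      have hlen : w.toList.length = kw.toList.length + 1 := by exact_mod_cast h
      have htl : t.length = 1 := by rw [← ht] at hlen; simp at hlen; omega
      obtain ⟨c, rfl⟩ := List.length_eq_one_iff.mp htl
      rcases hc with hc | hc
      · rw [← ht, mws_concat_get] at hc
        exact Or.inl (Or.inr (by rw [← ht]; simp at hc; simp [hc]))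
      · rw [← ht, mws_concat_get] at hc
        exact Or.inr (by rw [← ht]; simp at hc; simp [hc])
  · rintro ((h | h) | h) <;> rw [h]
    · exact ⟨List.prefix_refl _, Or.inl rfl⟩
    · exact ⟨⟨['.'], rfl⟩, Or.inr ⟨by simp, Or.inl (mws_concat_get _ '.')⟩⟩
    · exact ⟨⟨[','], rfl⟩, Or.inr ⟨by simp, Or.inr (mws_concat_get _ ',')⟩⟩

-- A's branch cascade on one word, flattened to the single test mwsHit
lemma mws_body_eq (kw w : String) (m : Int) (acc : List Int) :
    (if PySem.Str.startswith w kw = true then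
       if PySem.Str.len w = PySem.Str.len kw then acc ++ [m]
       else if PySem.Str.len w = PySem.Str.len kw + 1 then
         if PySem.Str.pyGet? w (PySem.Str.len w - 1) = some '.' ∨
            PySem.Str.pyGet? w (PySem.Str.len w - 1) = some ',' then acc ++ [m] else acc
       else acc
     else acc) = if mwsHit kw w then acc ++ [m] else acc := by
  have hiff := mws_cond_iff kw w
  by_cases hh : mwsHit kw w = true
  · rw [if_pos hh]
    obtain ⟨h1, h2⟩ := hiff.mpr hh
    rw [if_pos h1]
    rcases h2 with h2 | ⟨h3, h4⟩
    · rw [if_pos h2]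
    · rw [if_neg (by omega), if_pos h3, if_pos h4]
  · rw [if_neg hh]
    split_ifs with h1 h2 h3 h4
    · exact absurd (hiff.mp ⟨h1, Or.inl h2⟩) hh
    · exact absurd (hiff.mp ⟨h1, Or.inr ⟨h3, h4⟩⟩) hh
    all_goals rfl

-- A's inner loop over the split words of one document
lemma mws_inner_eq (kw : String) (ws : List String) (m : Int) (acc : List Int) :
    (PySem.List.pyRange 0 (PySem.List.len ws) 1).foldl (fun list_of_index k =>
      let selected_word := PySem.List.pyGetD ws k ""
      let length_of_selected_word := PySem.Str.len selected_word
      if PySem.Str.startswith selected_word kw = true then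
        if length_of_selected_word = PySem.Str.len kw then
          list_of_index ++ [m]
        else if length_of_selected_word = PySem.Str.len kw + 1 then
          if PySem.Str.pyGet? selected_word (length_of_selected_word - 1) = some '.' ∨
             PySem.Str.pyGet? selected_word (length_of_selected_word - 1) = some ',' then
            list_of_index ++ [m]
          else list_of_index
        else list_of_index
      else list_of_index) acc
    = acc ++ (ws.filter (mwsHit kw)).map (fun _ => m) := by
  rw [PySem.List.len_eq, PySem.List.foldl_pyRange_zero_pyGetD' ws ""
    (fun list_of_index selected_word =>
      let length_of_selected_word := PySem.Str.len selected_word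
      if PySem.Str.startswith selected_word kw = true then
        if length_of_selected_word = PySem.Str.len kw then
          list_of_index ++ [m]
        else if length_of_selected_word = PySem.Str.len kw + 1 then
          if PySem.Str.pyGet? selected_word (length_of_selected_word - 1) = some '.' ∨
             PySem.Str.pyGet? selected_word (length_of_selected_word - 1) = some ',' then
            list_of_index ++ [m]
          else list_of_index
        else list_of_index
      else list_of_index) acc]
  have h2 : List.foldl (fun (list_of_index : List Int) (selected_word : String) =>
      let length_of_selected_word := PySem.Str.len selected_word
      if PySem.Str.startswith selected_word kw = true then
        if length_of_selected_word = PySem.Str.len kw then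
          list_of_index ++ [m]
        else if length_of_selected_word = PySem.Str.len kw + 1 then
          if PySem.Str.pyGet? selected_word (length_of_selected_word - 1) = some '.' ∨
             PySem.Str.pyGet? selected_word (length_of_selected_word - 1) = some ',' then
            list_of_index ++ [m]
          else list_of_index
        else list_of_index
      else list_of_index) acc ws
      = List.foldl (fun acc w => if mwsHit kw w then acc ++ [m] else acc) acc ws :=
    PySem.List.foldl_congr_mem' _ _ _ _ (fun w _ acc => mws_body_eq kw w m acc)
  rw [h2]
  exact PySem.List.foldl_append_if (mwsHit kw) (fun _ => m) ws acc

-- A as a flatMap over the enumerated documents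
lemma word_search_eq_flatMap (dl : List String) (kw : String) :
    word_search dl kw
      = (PySem.List.enumerate dl).flatMap
          (fun p => ((mwsWords p.2).filter (mwsHit kw)).map (fun _ => p.1)) := by
  unfold word_search
  have h1 : (PySem.List.pyRange 0 (PySem.List.len dl) 1).foldl (fun list_of_index m =>
      let lowered_doc_list := PySem.Str.lower (PySem.List.pyGetD dl m "")
      let splitted_doc_list := PySem.Str.split₀ lowered_doc_list
      (PySem.List.pyRange 0 (PySem.List.len splitted_doc_list) 1).foldl (fun list_of_index k =>
        let selected_word := PySem.List.pyGetD splitted_doc_list k ""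
        let length_of_selected_word := PySem.Str.len selected_word
        if PySem.Str.startswith selected_word kw = true then
          if length_of_selected_word = PySem.Str.len kw then
            list_of_index ++ [m]
          else if length_of_selected_word = PySem.Str.len kw + 1 then
            if PySem.Str.pyGet? selected_word (length_of_selected_word - 1) = some '.' ∨
               PySem.Str.pyGet? selected_word (length_of_selected_word - 1) = some ',' then
              list_of_index ++ [m]
            else list_of_index
          else list_of_index
        else list_of_index) list_of_index) []
      = (PySem.List.pyRange 0 (PySem.List.len dl) 1).foldl (fun acc m =>
          acc ++ ((mwsWords (PySem.List.pyGetD dl m "")).filter (mwsHit kw)).map (fun _ => m)) [] :=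
    PySem.List.foldl_congr_mem' _ _ _ _ (fun m _ acc => mws_inner_eq kw _ m acc)
  rw [h1, PySem.List.len_eq]
  have h2 : (PySem.List.pyRange 0 (dl.length : Int) 1).foldl (fun acc m =>
        acc ++ ((mwsWords (PySem.List.pyGetD dl m "")).filter (mwsHit kw)).map (fun _ => m)) []
      = ((PySem.List.pyRange 0 (dl.length : Int) 1).map (fun j => (j, PySem.List.pyGetD dl j ""))).foldl
          (fun acc p => acc ++ ((mwsWords p.2).filter (mwsHit kw)).map (fun _ => p.1)) [] := by
    rw [List.foldl_map]
  rw [h2, ← PySem.List.len_eq, ← PySem.List.enumerate_eq_map_pyRange]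
  rw [PySem.List.foldl_append_eq_flatMap]
  simp

-- generic: lookup after B's insert/append loop
lemma mws_getD_fold (l : List (String × Int)) (d : PySem.Dict String (List Int)) (c : String) :
    (l.foldl (fun d p => d.insert p.1 (d.getD p.1 [] ++ [p.2])) d).getD c []
      = d.getD c [] ++ (l.filter (fun p => p.1 == c)).map (·.2) := by
  induction l generalizing d with
  | nil => simp
  | cons a t ih =>
    simp only [List.foldl_cons, List.filter_cons, ih]
    by_cases h : a.1 = c
    · subst h
      simp [PySem.Dict.getD_insert_self]
    · simp [PySem.Dict.getD_insert, h, Ne.symm h]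

-- B's index answers lookups by occurrence, in document order
lemma mwsIndex_getD (dl : List String) (c : String) :
    (mwsIndex dl).getD c []
      = (PySem.List.enumerate dl).flatMap
          (fun p => ((mwsWords p.2).filter (fun x => x == c)).map (fun _ => p.1)) := by
  unfold mwsIndex
  have h1 : (PySem.List.enumerate dl).foldl (fun index p =>
        (PySem.Str.split₀ (PySem.Str.lower p.2)).foldl (fun index w =>
          index.insert w (index.getD w [] ++ [p.1])) index) PySem.Dict.empty
      = ((PySem.List.enumerate dl).flatMap (fun p => (mwsWords p.2).map (fun w => (w, p.1)))).foldl
          (fun d q => d.insert q.1 (d.getD q.1 [] ++ [q.2])) PySem.Dict.empty := by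
    rw [List.foldl_flatMap]
    exact PySem.List.foldl_congr_mem' _ _ _ _ (fun p _ d => by rw [List.foldl_map]; rfl)
  rw [h1, mws_getD_fold]
  simp [List.filter_flatMap, List.map_flatMap, List.filter_map, List.map_map, Function.comp_def,
    PySem.Dict.getD_empty]

-- the three exclusive hit kinds count up to A's count
lemma mws_countP_tri (kw : String) (ws : List String) :
    ws.countP (mwsHit kw)
      = ws.countP (· == kw) + ws.countP (· == kw ++ ".") + ws.countP (· == kw ++ ",") := by
  have hpt : ∀ w : String, (if mwsHit kw w then 1 else 0)
      = (if (w == kw) then 1 else 0) + (if (w == kw ++ ".") then 1 else 0)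
        + (if (w == kw ++ ",") then 1 else 0) := by
    intro w
    simp only [mwsHit, Bool.or_eq_true, beq_iff_eq]
    by_cases h1 : w = kw <;> by_cases h2 : w = kw ++ "." <;> by_cases h3 : w = kw ++ ","
    · exact absurd (h1.symm.trans h2) (mws_ne_dot kw)
    · exact absurd (h1.symm.trans h2) (mws_ne_dot kw)
    · exact absurd (h1.symm.trans h3) (mws_ne_comma kw)
    · simp [h1, mws_ne_dot kw, mws_ne_comma kw]
    · exact absurd (h2.symm.trans h3) (mws_dot_ne_comma kw)
    · simp [h2]
    · simp [h3]
    · simp [h1, h2, h3]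
  induction ws with
  | nil => simp
  | cons w t ih =>
    simp only [List.countP_cons, ih]
    have h := hpt w
    omega

-- the three filtered groups of one document concatenate to A's filtered group
lemma mws_group_eq (kw : String) (ws : List String) (m : Int) :
    ((ws.filter (· == kw)).map (fun _ => m)) ++ ((ws.filter (· == kw ++ ".")).map (fun _ => m))
        ++ ((ws.filter (· == kw ++ ",")).map (fun _ => m))
      = (ws.filter (mwsHit kw)).map (fun _ => m) := by
  simp only [List.map_const', ← List.countP_eq_length_filter, ← List.replicate_add, mws_countP_tri]

-- B's three lookup lists together are a permutation of A's result
lemma mws_perm (dl : List String) (kw : String) :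
    ((mwsIndex dl).getD kw [] ++ (mwsIndex dl).getD (kw ++ ".") [] ++ (mwsIndex dl).getD (kw ++ ",") []).Perm
      (word_search dl kw) := by
  rw [mwsIndex_getD, mwsIndex_getD, mwsIndex_getD, word_search_eq_flatMap]
  set E := PySem.List.enumerate dl with hE
  set f1 := fun p : Int × String => ((mwsWords p.2).filter (fun x => x == kw)).map (fun _ => p.1) with hf1
  set f2 := fun p : Int × String => ((mwsWords p.2).filter (fun x => x == kw ++ ".")).map (fun _ => p.1) with hf2
  set f3 := fun p : Int × String => ((mwsWords p.2).filter (fun x => x == kw ++ ",")).map (fun _ => p.1) with hf3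
  refine ((List.flatMap_append_perm E f1 f2).append_right _).trans ?_
  refine (List.flatMap_append_perm E (fun p => f1 p ++ f2 p) f3).trans ?_
  exact List.Perm.of_eq (List.flatMap_congr (fun p _ => mws_group_eq kw (mwsWords p.2) p.1))


-- values produced per enumerated document are the document's index, so A's result is nondecreasing
lemma mws_pairwise_flatMap {β : Type} (l : List (Int × β)) (f : Int × β → List Int)
    (hl : l.Pairwise (fun p q => p.1 < q.1)) (hf : ∀ p, ∀ x ∈ f p, x = p.1) :
    (l.flatMap f).Pairwise (· ≤ ·) := by
  induction l with
  | nil => simp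
  | cons a t ih =>
    simp only [List.flatMap_cons]
    rw [List.pairwise_append]
    refine ⟨?_, ih hl.of_cons, ?_⟩
    · apply List.pairwise_iff_forall_sublist.mpr
      intro x y hxy
      have hx := hf a x (hxy.subset (by simp))
      have hy := hf a y (hxy.subset (by simp))
      simp [hx, hy]
    · intro x hx y hy
      rcases List.mem_flatMap.mp hy with ⟨q, hq, hyq⟩
      have h1 := hf a x hx
      have h2 := hf q y hyq
      have h3 : a.1 < q.1 := (List.pairwise_cons.mp hl).1 q hq
      omega

lemma word_search_sorted (dl : List String) (kw : String) :
    (word_search dl kw).Pairwise (· ≤ ·) := by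
  rw [word_search_eq_flatMap]
  refine mws_pairwise_flatMap _ _ (PySem.List.pairwise_lt_enumerate dl 0) ?_
  intro p x hx
  rcases List.mem_map.mp hx with ⟨w, _, rfl⟩
  rfl

-- the per-keyword value of B equals A's word_search
lemma mws_value_eq (dl : List String) (kw : String) :
    word_search dl kw
      = PySem.List.sorted
          ((mwsIndex dl).getD kw [] ++ (mwsIndex dl).getD (kw ++ ".") [] ++ (mwsIndex dl).getD (kw ++ ",") [])
          (fun x => x) false := by
  exact (PySem.List.sorted_id_eq_of_perm_of_pairwise _ _ (mws_perm dl kw).symm (word_search_sorted dl kw)).symm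

-- ===== VERDICT (by name: the statement is the Claim_ definition above) =====
theorem multi_word_search_spec : Claim_equal_multi_word_search := by
  intro dl kws _
  unfold Spec_multi_word_search multi_word_search multi_word_search_alt
  have hA : (PySem.List.pyRange 0 (PySem.List.len kws) 1).foldl (fun dictionary i =>
        let selected_keyword := PySem.List.pyGetD kws i ""
        dictionary.insert selected_keyword (word_search dl selected_keyword))
      (PySem.Dict.empty : PySem.Dict String (List Int))
      = kws.foldl (fun d k => d.insert k (word_search dl k)) PySem.Dict.empty := by
    rw [PySem.List.len_eq]
    exact PySem.List.foldl_pyRange_zero_pyGetD' kws ""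
      (fun dictionary selected_keyword =>
        dictionary.insert selected_keyword (word_search dl selected_keyword)) PySem.Dict.empty
  rw [hA]
  have hB : kws.foldl (fun d k => d.insert k (word_search dl k)) (PySem.Dict.empty : PySem.Dict String (List Int))
      = kws.foldl (fun result k =>
          result.insert k (PySem.List.sorted
            ((mwsIndex dl).getD k [] ++ (mwsIndex dl).getD (k ++ ".") [] ++ (mwsIndex dl).getD (k ++ ",") [])
            (fun x => x) false)) PySem.Dict.empty :=
    PySem.List.foldl_congr_mem' _ _ _ _ (fun k _ d => by rw [mws_value_eq])
  rw [hB]
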